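-- pv_equiv track=rewrite | github.com/Kennyz-z/OnlineLearningMod | src/utils/ensembleprepare.py | last_issuance_date
-- ===== SOURCE A (Python) =====
-- def last_issuance_date(issuance_dates,this_date):
--     for i,issuance_date in enumerate(issuance_dates):
--         if issuance_date<this_date:
--             continue
--         elif issuance_date==this_date:
--             return issuance_date
--         elif issuance_date>this_date:
--             return issuance_dates[i-1]
--     if this_date>issuance_dates[-1]:
--         return issuance_dates[-1]
-- ===== SOURCE B (Python) =====
-- def last_issuance_date(issuance_dates, this_date):
--     # binary search (hand-rolled bisect_left) over the sorted issuance dates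
--     lo, hi = 0, len(issuance_dates)
--     while lo < hi:
--         mid = (lo + hi) // 2
--         if issuance_dates[mid] < this_date:
--             lo = mid + 1
--         else:
--             hi = mid
--     if lo < len(issuance_dates) and issuance_dates[lo] == this_date:
--         return this_date
--     return issuance_dates[lo - 1]
-- ===== Notes on version B (the rewrite author's own statement) =====
-- stated objective: alternative
-- what changed: Replaced A's left-to-right linear scan with a hand-rolled bisect_left binary search on the sorted date list, deriving the answer from the insertion point (issuance_dates[lo-1], with Python's negative indexing covering the below-all-dates case like A); a timing run's random inputs are unsorted (outside Pre_), so no measured speed-up is claimed.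
-- outside the precondition, e.g. on last_issuance_date([5, 1, 9], 4): A returns 9, B returns 1; on last_issuance_date([3, 1], 2): A returns 1, B returns 1
import Mathlib
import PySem

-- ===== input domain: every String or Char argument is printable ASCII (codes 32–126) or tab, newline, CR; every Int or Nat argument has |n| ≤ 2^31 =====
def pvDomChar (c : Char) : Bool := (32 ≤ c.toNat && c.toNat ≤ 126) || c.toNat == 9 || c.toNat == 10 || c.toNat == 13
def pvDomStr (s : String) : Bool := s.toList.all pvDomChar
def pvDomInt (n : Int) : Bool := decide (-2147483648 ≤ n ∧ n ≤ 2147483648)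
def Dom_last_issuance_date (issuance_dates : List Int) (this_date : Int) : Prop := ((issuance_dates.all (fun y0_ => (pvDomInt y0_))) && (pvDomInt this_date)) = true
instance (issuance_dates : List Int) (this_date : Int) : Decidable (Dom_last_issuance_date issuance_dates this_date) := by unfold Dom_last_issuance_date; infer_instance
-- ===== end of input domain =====

-- B replaces A's left-to-right linear scan by a bisect_left binary search (O(log n) comparisons
-- on the sorted lists Pre_ admits; no measured speed is claimed); equivalence is proved on Pre_.

-- ===== PORT A =====
-- the for-loop over enumerate(issuance_dates): 'some r' = the loop executed 'return r', 'none' = fell through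
def lastA_loop (xs : List Int) (t : Int) : Nat → List Int → Option (Option Int)
  | _, [] => none
  | i, d :: rest =>
    if d < t then lastA_loop xs t (i + 1) rest
    else if d = t then some (some d)
    else some (PySem.List.pyGet? xs ((i : Int) - 1))   -- issuance_dates[i-1] (negative index wraps)

def last_issuance_date (issuance_dates : List Int) (this_date : Int) : Option Int :=
  match lastA_loop issuance_dates this_date 0 issuance_dates with
  | some r => r
  | none =>
    -- 'if this_date > issuance_dates[-1]'; on [] the Python raises IndexError (outside Pre_)
    match PySem.List.pyGet? issuance_dates (-1) with
    | some last => if this_date > last then some last else none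
    | none => none

-- ===== PORT B =====
-- the while-loop of Source B (hand-rolled bisect_left); fuel hi - lo only makes it structural
def lastAltGo (xs : List Int) (t : Int) : Nat → Nat → Nat → Nat
  | 0, lo, _ => lo
  | fuel + 1, lo, hi =>
    if lo < hi then
      let mid := (lo + hi) / 2   -- (lo+hi)//2: Nat division = Python floor division (operands nonnegative)
      if xs.getD mid 0 < t then lastAltGo xs t fuel (mid + 1) hi
      else lastAltGo xs t fuel lo mid
    else lo

def last_issuance_date_alt (issuance_dates : List Int) (this_date : Int) : Option Int :=
  let lo := lastAltGo issuance_dates this_date issuance_dates.length 0 issuance_dates.length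
  if lo < issuance_dates.length ∧ issuance_dates.getD lo 0 = this_date then some this_date
  else PySem.List.pyGet? issuance_dates ((lo : Int) - 1)   -- issuance_dates[lo-1] (negative index wraps; [] raises, outside Pre_)

-- ===== PRECONDITION & SPEC =====
-- Pre_ excludes the empty list (A raises IndexError on issuance_dates[-1]) and unsorted lists
-- (unless all their dates lie on one side of this_date, where order cannot matter): the function's
-- stated purpose assumes sorted issuance dates, and A's first-match scan and B's binary search are
-- only specified there (e.g. on unsorted [5,1,9] with date 4, A returns 9 and B returns 1).
def Pre_last_issuance_date (issuance_dates : List Int) (this_date : Int) : Prop :=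
  issuance_dates ≠ [] ∧ (issuance_dates.Pairwise (· ≤ ·) ∨
    (∀ d ∈ issuance_dates, d < this_date) ∨ (∀ d ∈ issuance_dates, this_date ≤ d))
instance (issuance_dates : List Int) (this_date : Int) : Decidable (Pre_last_issuance_date issuance_dates this_date) := by unfold Pre_last_issuance_date; infer_instance

def pvWitness_last_issuance_date : List Int × Int := ([1, 3, 3, 7], 4)

def Spec_last_issuance_date (issuance_dates : List Int) (this_date : Int) (out : Option Int) : Prop := out = last_issuance_date_alt issuance_dates this_date
instance (issuance_dates : List Int) (this_date : Int) (out : Option Int) : Decidable (Spec_last_issuance_date issuance_dates this_date out) := by unfold Spec_last_issuance_date; infer_instance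

-- ===== CLAIM (what is proved, stated in full; the proofs are below) =====
def Claim_equal_last_issuance_date : Prop := ∀ (issuance_dates : List Int) (this_date : Int), Dom_last_issuance_date issuance_dates this_date → Pre_last_issuance_date issuance_dates this_date → Spec_last_issuance_date issuance_dates this_date (last_issuance_date issuance_dates this_date)

-- ===== LEMMAS AND PROOFS =====

-- "k is the bisect_left insertion point of t in xs": everything left of k is < t, nothing from k on is
def IsBoundary (xs : List Int) (t : Int) (k : Nat) : Prop :=
  k ≤ xs.length ∧ (∀ i, i < k → xs.getD i 0 < t) ∧ (∀ i, k ≤ i → i < xs.length → ¬ xs.getD i 0 < t)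

theorem sorted_getD_mono (xs : List Int) (hs : xs.Pairwise (· ≤ ·)) (i j : Nat)
    (hij : i ≤ j) (hj : j < xs.length) : xs.getD i 0 ≤ xs.getD j 0 := by
  rcases Nat.eq_or_lt_of_le hij with rfl | hlt
  · exact le_refl _
  · rw [List.getD_eq_getElem _ _ (lt_trans hlt hj), List.getD_eq_getElem _ _ hj]
    exact (List.pairwise_iff_getElem.mp hs) i j (lt_trans hlt hj) hj hlt

theorem altGo_boundary (xs : List Int) (t : Int) (hs : xs.Pairwise (· ≤ ·)) :
    ∀ (fuel lo hi : Nat), hi ≤ xs.length → lo ≤ hi → hi - lo ≤ fuel →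
    (∀ i, i < lo → xs.getD i 0 < t) →
    (∀ i, hi ≤ i → i < xs.length → ¬ xs.getD i 0 < t) →
    IsBoundary xs t (lastAltGo xs t fuel lo hi) := by
  intro fuel
  induction fuel with
  | zero =>
    intro lo hi hhi hlohi hfuel hpre hpost
    have : lo = hi := by omega
    subst this
    exact ⟨le_trans hlohi hhi, hpre, hpost⟩
  | succ fuel ih =>
    intro lo hi hhi hlohi hfuel hpre hpost
    simp only [lastAltGo]
    by_cases h : lo < hi
    · simp only [h, if_true]
      set mid := (lo + hi) / 2 with hmid
      have hmlo : lo ≤ mid := by omega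
      have hmhi : mid < hi := by omega
      by_cases hcmp : xs.getD mid 0 < t
      · simp only [hcmp, if_true]
        exact ih (mid + 1) hi hhi (by omega) (by omega)
          (fun i hi2 => lt_of_le_of_lt
            (sorted_getD_mono xs hs i mid (by omega) (by omega)) hcmp)
          hpost
      · simp only [hcmp, if_false]
        exact ih lo mid (by omega) hmlo (by omega) hpre
          (fun i hi2 hlen hlt =>
            hcmp (lt_of_le_of_lt (sorted_getD_mono xs hs mid i hi2 hlen) hlt))
    · simp only [h, if_false]
      have : lo = hi := by omega
      subst this
      exact ⟨le_trans hlohi hhi, hpre, hpost⟩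

-- A's scan, characterized by the boundary k (no sortedness needed: the boundary says it all)
theorem aLoop_char (xs : List Int) (t : Int) (k : Nat) (hb : IsBoundary xs t k) :
    ∀ (rest : List Int) (i : Nat), xs.drop i = rest → i ≤ k →
    lastA_loop xs t i rest =
      if k < xs.length then
        some (if xs.getD k 0 = t then some (xs.getD k 0)
              else PySem.List.pyGet? xs ((k : Int) - 1))
      else none := by
  obtain ⟨hk, hlt, hge⟩ := hb
  intro rest
  induction rest with
  | nil =>
    intro i hdrop hik
    have hlen : xs.length ≤ i := by
      by_contra hc
      have := List.drop_eq_nil_iff.mp hdrop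
      omega
    have hkl : k = xs.length := by omega
    simp [lastA_loop, hkl]
  | cons d rest ih =>
    intro i hdrop hik
    have hilen : i < xs.length := by
      by_contra hc
      rw [List.drop_eq_nil_iff.mpr (by omega)] at hdrop
      simp at hdrop
    have hdi : xs.getD i 0 = d := by
      have h1 : (xs.drop i)[0]? = some d := by rw [hdrop]; rfl
      rw [List.getElem?_drop, List.getElem?_eq_getElem (by omega : i + 0 < xs.length)] at h1
      rw [List.getD_eq_getElem _ _ hilen]
      simpa using h1
    simp only [lastA_loop]
    by_cases hcmp : d < t
    · -- continue: the boundary lies strictly beyond i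
      have hik2 : i < k := by
        rcases Nat.eq_or_lt_of_le hik with heq2 | h
        · exfalso; apply hge i (le_of_eq heq2.symm) hilen; rw [hdi]; exact hcmp
        · exact h
      have hdrop' : xs.drop (i + 1) = rest := by
        have : xs.drop (i + 1) = (xs.drop i).drop 1 := by
          rw [List.drop_drop]
        rw [this, hdrop]; rfl
      rw [if_pos hcmp]
      exact ih (i + 1) hdrop' hik2
    · -- d ≥ t: here k = i
      have hki : k = i := by
        rcases Nat.eq_or_lt_of_le hik with heq2 | h
        · exact heq2.symm
        · exfalso; apply hcmp; rw [← hdi]; exact hlt i h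
      rw [if_neg hcmp]
      by_cases heq : d = t
      · rw [if_pos heq, if_pos (by omega), if_pos (by rw [hki, hdi]; exact heq)]
        rw [hki, hdi]
      · rw [if_neg heq, if_pos (by omega), if_neg (by rw [hki, hdi]; exact heq), hki]

theorem getD_last (xs : List Int) (hne : xs ≠ []) :
    PySem.List.pyGet? xs (-1) = some (xs.getD (xs.length - 1) 0) := by
  rw [PySem.List.pyGet?_neg_one]
  have hlen : 0 < xs.length := List.length_pos_iff.mpr hne
  rw [List.getLast?_eq_getElem?, List.getD_eq_getElem _ _ (by omega)]
  simp [List.getElem?_eq_getElem (show xs.length - 1 < xs.length by omega)]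

theorem pyGet?_pred (xs : List Int) (k : Nat) (h1 : 0 < k) (h2 : k ≤ xs.length) :
    PySem.List.pyGet? xs ((k : Int) - 1) = some (xs.getD (k - 1) 0) := by
  have : ((k : Int) - 1) = ((k - 1 : Nat) : Int) := by omega
  rw [this, PySem.List.pyGet?_natCast, List.getD_eq_getElem _ _ (by omega)]
  exact List.getElem?_eq_getElem (by omega)

-- the boundary that B computes
theorem alt_boundary (xs : List Int) (t : Int) (hs : xs.Pairwise (· ≤ ·)) :
    IsBoundary xs t (lastAltGo xs t xs.length 0 xs.length) :=
  altGo_boundary xs t hs xs.length 0 xs.length le_rfl (Nat.zero_le _) (by omega)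
    (fun i h => absurd h (Nat.not_lt_zero i)) (fun i h1 h2 => absurd (lt_of_le_of_lt h1 h2) (lt_irrefl _))

theorem alt_unfold (xs : List Int) (t : Int) :
    last_issuance_date_alt xs t =
      (if lastAltGo xs t xs.length 0 xs.length < xs.length ∧
          xs.getD (lastAltGo xs t xs.length 0 xs.length) 0 = t then some t
       else PySem.List.pyGet? xs ((lastAltGo xs t xs.length 0 xs.length : Int) - 1)) := rfl

-- when every date is below t, every probe sends the search right: the loop ends at hi
theorem altGo_all_lt (xs : List Int) (t : Int) (hall : ∀ i, i < xs.length → xs.getD i 0 < t) :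
    ∀ (fuel lo hi : Nat), hi ≤ xs.length → lo ≤ hi → hi - lo ≤ fuel →
    lastAltGo xs t fuel lo hi = hi := by
  intro fuel
  induction fuel with
  | zero => intro lo hi h1 h2 h3; show lo = hi; omega
  | succ fuel ih =>
    intro lo hi h1 h2 h3
    simp only [lastAltGo]
    by_cases h : lo < hi
    · have hc := hall ((lo + hi) / 2) (by omega)
      simp only [h, if_true, hc]
      exact ih _ _ h1 (by omega) (by omega)
    · simp only [h, if_false]; omega

-- when every date is at or above t, every probe sends the search left: the loop ends at lo
theorem altGo_all_ge (xs : List Int) (t : Int) (hall : ∀ i, i < xs.length → ¬ xs.getD i 0 < t) :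
    ∀ (fuel lo hi : Nat), hi ≤ xs.length → lo ≤ hi → hi - lo ≤ fuel →
    lastAltGo xs t fuel lo hi = lo := by
  intro fuel
  induction fuel with
  | zero => intro lo hi h1 h2 h3; rfl
  | succ fuel ih =>
    intro lo hi h1 h2 h3
    simp only [lastAltGo]
    by_cases h : lo < hi
    · have hc := hall ((lo + hi) / 2) (by omega)
      simp only [h, if_true, hc, if_false]
      exact ih _ _ (by omega) (by omega) (by omega)
    · simp only [h, if_false]

theorem getD_of_all {P : Int → Prop} (xs : List Int) (h : ∀ d ∈ xs, P d) (i : Nat)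
    (hi : i < xs.length) : P (xs.getD i 0) := by
  rw [List.getD_eq_getElem _ _ hi]
  exact h _ (List.getElem_mem hi)

-- ===== VERDICT (by name: the statement is the Claim_ definition above) =====
theorem last_issuance_date_spec : Claim_equal_last_issuance_date := by
  intro xs t _hdom hpre
  unfold Spec_last_issuance_date
  obtain ⟨hne, hcase⟩ := hpre
  set k := lastAltGo xs t xs.length 0 xs.length with hkdef
  have hb : IsBoundary xs t k := by
    rcases hcase with hs | hall | hall
    · exact alt_boundary xs t hs
    · have hall' : ∀ i, i < xs.length → xs.getD i 0 < t := getD_of_all xs hall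
      have hk : lastAltGo xs t xs.length 0 xs.length = xs.length :=
        altGo_all_lt xs t hall' xs.length 0 xs.length le_rfl (Nat.zero_le _) (by omega)
      rw [hkdef, hk]
      exact ⟨le_rfl, fun i hi => hall' i hi, fun i h1 h2 => by omega⟩
    · have hall' : ∀ i, i < xs.length → ¬ xs.getD i 0 < t :=
        fun i hi => not_lt.mpr (getD_of_all xs hall i hi)
      have hk : lastAltGo xs t xs.length 0 xs.length = 0 :=
        altGo_all_ge xs t hall' xs.length 0 xs.length le_rfl (Nat.zero_le _) (by omega)
      rw [hkdef, hk]
      exact ⟨Nat.zero_le _, fun i hi => by omega, fun i _ h2 => hall' i h2⟩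
  have hA := aLoop_char xs t k hb xs 0 (by simp) (Nat.zero_le _)
  have hlen : 0 < xs.length := List.length_pos_iff.mpr hne
  unfold last_issuance_date
  rw [alt_unfold, ← hkdef, hA]
  by_cases hkl : k < xs.length
  · rw [if_pos hkl]
    show (if xs.getD k 0 = t then some (xs.getD k 0) else PySem.List.pyGet? xs ((k : Int) - 1)) =
      (if k < xs.length ∧ xs.getD k 0 = t then some t
       else PySem.List.pyGet? xs ((k : Int) - 1))
    by_cases heq : xs.getD k 0 = t
    · rw [if_pos heq, if_pos (And.intro hkl heq), heq]
    · rw [if_neg heq, if_neg (fun h => heq h.2)]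
  · rw [if_neg hkl]
    have hkeq : k = xs.length := by have := hb.1; omega
    have hlast : xs.getD (xs.length - 1) 0 < t := hb.2.1 (xs.length - 1) (by omega)
    show (match PySem.List.pyGet? xs (-1) with
          | some last => if t > last then some last else none
          | none => none) =
      (if k < xs.length ∧ xs.getD k 0 = t then some t
       else PySem.List.pyGet? xs ((k : Int) - 1))
    rw [getD_last xs hne]
    show (if t > xs.getD (xs.length - 1) 0 then some (xs.getD (xs.length - 1) 0) else none) =
      (if k < xs.length ∧ xs.getD k 0 = t then some t
       else PySem.List.pyGet? xs ((k : Int) - 1))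
    rw [if_pos hlast, if_neg (fun h => hkl h.1),
      pyGet?_pred xs k (by omega) (le_of_eq hkeq), hkeq]
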